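-- pv_equiv track=rewrite | github.com/parallel-group/cuke | apps/gpm/utils.py | query_dfs
-- ===== SOURCE A (Python) =====
-- def query_dfs(pmtx):
--     edge_order = []
--
--     def _query_dfs(query_adjlist, cur_node, visited):
--         if cur_node not in visited:
--             visited.add(cur_node)
--             for adj_node in query_adjlist[cur_node]:
--                 if [cur_node, adj_node] not in edge_order and [adj_node, cur_node] not in edge_order:
--                     edge_order.append([cur_node, adj_node])
--                 _query_dfs(query_adjlist, adj_node, visited)
--
--     query_adjlist = []
--
--     for row_idx in range(0, len(pmtx)):
--         this_list = []
--         for col_idx in range(0, len(pmtx[row_idx])):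
--             if pmtx[row_idx][col_idx]==1:
--                 this_list.append(col_idx)
--
--         query_adjlist.append(this_list)
--
--     _query_dfs(query_adjlist, 0, set())
--     return edge_order
-- ===== SOURCE B (Python) =====
-- def query_dfs(pmtx):
--     adjlist = [[j for j, v in enumerate(row) if v == 1] for row in pmtx]
--     edge_order = []
--     visited = {0}
--     stack = [[0, 0]]  # frame: [node, position of next neighbour]
--     while stack:
--         node, pos = stack[-1]
--         nbrs = adjlist[node]
--         if pos == len(nbrs):
--             stack.pop()
--             continue
--         stack[-1][1] = pos + 1
--         a = nbrs[pos]
--         if [node, a] not in edge_order and [a, node] not in edge_order: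
--             edge_order.append([node, a])
--         if a not in visited:
--             visited.add(a)
--             stack.append([a, 0])
--     return edge_order
-- ===== Notes on version B (the rewrite author's own statement) =====
-- stated objective: alternative
-- what changed: The recursive depth-first traversal is replaced by an iterative DFS driven by an explicit stack of [node, position] frames (edges recorded at neighbour-fetch time, nodes marked visited on push), and the adjacency list is built by comprehensions instead of index loops.
-- outside the precondition, e.g. on query_dfs([[0], [0, 1, 1]]): A returns [], B returns []
import Mathlib
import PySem

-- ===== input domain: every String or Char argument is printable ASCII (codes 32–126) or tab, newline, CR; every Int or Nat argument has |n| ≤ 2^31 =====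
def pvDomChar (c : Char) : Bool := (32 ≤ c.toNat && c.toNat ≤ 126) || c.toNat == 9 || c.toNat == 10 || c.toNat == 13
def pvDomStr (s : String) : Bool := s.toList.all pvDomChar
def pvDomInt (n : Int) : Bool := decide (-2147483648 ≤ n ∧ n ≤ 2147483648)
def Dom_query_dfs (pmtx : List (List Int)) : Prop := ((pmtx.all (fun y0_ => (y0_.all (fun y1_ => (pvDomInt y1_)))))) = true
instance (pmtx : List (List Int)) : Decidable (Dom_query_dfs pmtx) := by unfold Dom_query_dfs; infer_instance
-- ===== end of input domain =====

-- B replaces A's recursive DFS by an iterative DFS over an explicit stack of (node, position)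
-- frames (same traversal, same edge list); a different decomposition, not claimed faster.

-- ===== PORT A =====
-- Edge recording: the identical lines
--   'if [c,a] not in edge_order and [a,c] not in edge_order: edge_order.append([c,a])'
-- appear verbatim in both Pythons, so both ports share this helper.
def pvRecordEdge (c a : Int) (E : List (List Int)) : List (List Int) :=
  if [c, a] ∉ E ∧ [a, c] ∉ E then E ++ [[c, a]] else E

-- adjacency list, A's way: index loops over range(len(..)); the pyGetD indices come from
-- range(len(..)) so they are always in range and the defaults are never used (exact here).
def pvAdjA (pmtx : List (List Int)) : List (List Int) :=
  (PySem.List.pyRange 0 (PySem.List.len pmtx) 1).foldl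
    (fun acc i =>
      acc ++ [(PySem.List.pyRange 0 (PySem.List.len (PySem.List.pyGetD pmtx i [])) 1).foldl
        (fun tl j => if PySem.List.pyGetD (PySem.List.pyGetD pmtx i []) j 0 = 1 then tl ++ [j] else tl)
        []])
    []

-- _query_dfs (pvDfsA) and its 'for adj_node in query_adjlist[cur_node]' loop (pvLoopA);
-- fuel bounds the recursion DEPTH (each recursive level adds a fresh node to visited, so
-- pvFuelA below always suffices — proved in pvDfsA_total); none = IndexError on
-- query_adjlist[cur_node]
mutual
def pvDfsA (adj : List (List Int)) (f : Nat) (cur : Int) (E : List (List Int))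
    (V : PySem.Set Int) : Option (List (List Int) × PySem.Set Int) :=
  match f with
  | 0 => none
  | f' + 1 =>
    if PySem.Set.contains V cur then some (E, V)
    else
      match PySem.List.pyGet? adj cur with
      | none => none
      | some row => pvLoopA adj f' cur row E (PySem.Set.add V cur)
termination_by (f, 0, 0)

def pvLoopA (adj : List (List Int)) (f : Nat) (c : Int) (pend : List Int)
    (E : List (List Int)) (V : PySem.Set Int) : Option (List (List Int) × PySem.Set Int) :=
  match pend with
  | [] => some (E, V)
  | a :: rest =>
    match pvDfsA adj f a (pvRecordEdge c a E) V with
    | none => none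
    | some (E', V') => pvLoopA adj f c rest E' V'
termination_by (f, 1, pend.length)
end

def pvFuelA (adj : List (List Int)) : Nat := (PySem.List.dedup ((0 : Int) :: adj.flatten)).length + 1

def query_dfs (pmtx : List (List Int)) : List (List Int) :=
  let adj := pvAdjA pmtx
  match pvDfsA adj (pvFuelA adj) 0 [] PySem.Set.empty with
  | some out => out.1
  | none => []   -- A raises IndexError here (outside Pre_query_dfs)

-- ===== PORT B =====
-- adjacency list, B's way: comprehensions over enumerate
def pvAdjB (pmtx : List (List Int)) : List (List Int) :=
  pmtx.map (fun row =>
    (PySem.List.enumerate row).filterMap (fun jv => if jv.2 = 1 then some jv.1 else none))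

-- fuel bookkeeping for B: total remaining work over the not-yet-visited nodes
def pvMu (adj : List (List Int)) (V : PySem.Set Int) : Nat :=
  (((PySem.List.dedup ((0 : Int) :: adj.flatten)).filter
      (fun x => !(PySem.Set.contains V x))).map
    (fun x => ((PySem.List.pyGet? adj x).getD []).length + 1)).sum

-- one fuel unit = one iteration of Source B's while loop; pvFuelB below always suffices (proved
-- via pv_sim), so none = IndexError on adjlist[node]
def pvDfsB (adj : List (List Int)) : Nat → List (Int × Int) → List (List Int) →
    PySem.Set Int → Option (List (List Int))
  | 0, _, _, _ => none
  | _ + 1, [], E, _ => some E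
  | f + 1, (node, pos) :: S, E, V =>
    match PySem.List.pyGet? adj node with
    | none => none
    | some nbrs =>
      if pos = PySem.List.len nbrs then pvDfsB adj f S E V
      else
        match PySem.List.pyGet? nbrs pos with
        | none => none
        | some a =>
          if PySem.Set.contains V a then
            pvDfsB adj f ((node, pos + 1) :: S) (pvRecordEdge node a E) V
          else
            pvDfsB adj f ((a, 0) :: (node, pos + 1) :: S) (pvRecordEdge node a E)
              (PySem.Set.add V a)

def pvFuelB (adj : List (List Int)) : Nat :=
  ((PySem.List.pyGet? adj 0).getD []).length + pvMu adj (PySem.Set.add PySem.Set.empty 0) + 2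

def query_dfs_alt (pmtx : List (List Int)) : List (List Int) :=
  let adj := pvAdjB pmtx
  match pvDfsB adj (pvFuelB adj) [(0, 0)] [] (PySem.Set.add PySem.Set.empty 0) with
  | some E => E
  | none => []   -- B raises IndexError here (outside Pre_query_dfs)

-- ===== PRECONDITION & SPEC =====
-- Pre_ excludes the empty matrix and matrices having a 1-entry whose column index is ≥ the
-- number of rows: on those the DFS indexes the adjacency list out of range and raises
-- IndexError when it reaches that node (when the offending node is unreachable A still
-- returns; those inputs are excluded too — see claim.json "cites").
def Pre_query_dfs (pmtx : List (List Int)) : Prop :=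
  pmtx ≠ [] ∧ ∀ row ∈ pmtx, ∀ jv ∈ PySem.List.enumerate row, jv.2 = 1 → jv.1 < (pmtx.length : Int)
instance (pmtx : List (List Int)) : Decidable (Pre_query_dfs pmtx) := by
  unfold Pre_query_dfs; infer_instance

def pvWitness_query_dfs : List (List Int) := [[0, 1], [1, 0]]

def Spec_query_dfs (pmtx : List (List Int)) (out : List (List Int)) : Prop := out = query_dfs_alt pmtx
instance (pmtx : List (List Int)) (out : List (List Int)) : Decidable (Spec_query_dfs pmtx out) := by
  unfold Spec_query_dfs; infer_instance

-- ===== CLAIM (what is proved, stated in full; the proofs are below) =====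
def Claim_equal_query_dfs : Prop := ∀ (pmtx : List (List Int)), Dom_query_dfs pmtx → Pre_query_dfs pmtx → Spec_query_dfs pmtx (query_dfs pmtx)

-- ===== LEMMAS AND PROOFS =====

-- the node universe: every value the DFS can be called on
def pvNodes (adj : List (List Int)) : List Int := PySem.List.dedup ((0 : Int) :: adj.flatten)

def pvW (adj : List (List Int)) (x : Int) : Nat := ((PySem.List.pyGet? adj x).getD []).length + 1

theorem pvMu_eq (adj : List (List Int)) (V : PySem.Set Int) :
    pvMu adj V = (((pvNodes adj).filter (fun x => !(PySem.Set.contains V x))).map (pvW adj)).sum := rfl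

def pvUnvis (adj : List (List Int)) (V : PySem.Set Int) : Nat :=
  ((pvNodes adj).filter (fun x => !(PySem.Set.contains V x))).length

-- a good adjacency list: nonempty and every listed neighbour a valid index
def pvGood (adj : List (List Int)) : Prop :=
  adj ≠ [] ∧ ∀ x ∈ adj.flatten, 0 ≤ x ∧ x < (adj.length : Int)

theorem pv_contains_eq_true {V : PySem.Set Int} {x : Int} (h : x ∈ V) :
    PySem.Set.contains V x = true := by
  simp only [PySem.Set.contains_iff]; exact h

theorem pv_contains_eq_false {V : PySem.Set Int} {x : Int} (h : x ∉ V) :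
    PySem.Set.contains V x = false := by
  cases hc : PySem.Set.contains V x
  · rfl
  · simp only [PySem.Set.contains_iff] at hc; exact absurd hc h

theorem pv_mem_add_self (V : PySem.Set Int) (a : Int) : a ∈ PySem.Set.add V a := by
  simp [PySem.Set.mem_add]

theorem pv_mem_add_of_mem {V : PySem.Set Int} {y : Int} (a : Int) (h : y ∈ V) :
    y ∈ PySem.Set.add V a := by
  simp [PySem.Set.mem_add, h]

theorem pv_contains_add_ne (V : PySem.Set Int) (a y : Int) (h : y ≠ a) :
    PySem.Set.contains (PySem.Set.add V a) y = PySem.Set.contains V y := by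
  by_cases hy : y ∈ V
  · rw [pv_contains_eq_true (pv_mem_add_of_mem a hy), pv_contains_eq_true hy]
  · rw [pv_contains_eq_false hy, pv_contains_eq_false]
    intro hm
    rw [PySem.Set.mem_add] at hm
    rcases hm with h1 | h1
    · exact hy h1
    · exact h h1

-- unfolding equations packaged for the proofs below
theorem pvDfsA_zero (adj : List (List Int)) (cur : Int) (E : List (List Int))
    (V : PySem.Set Int) : pvDfsA adj 0 cur E V = none := by
  simp [pvDfsA]

theorem pvDfsA_succ_mem {adj : List (List Int)} {f : Nat} {cur : Int} {E : List (List Int)}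
    {V : PySem.Set Int} (hv : cur ∈ V) : pvDfsA adj (f + 1) cur E V = some (E, V) := by
  simp [pvDfsA, hv]

theorem pvDfsA_step {adj : List (List Int)} {f : Nat} {cur : Int} {E : List (List Int)}
    {V : PySem.Set Int} {row : List Int} (hv : cur ∉ V)
    (hrow : PySem.List.pyGet? adj cur = some row) :
    pvDfsA adj (f + 1) cur E V = pvLoopA adj f cur row E (PySem.Set.add V cur) := by
  simp [pvDfsA, hv, hrow]

theorem pvDfsA_step_none {adj : List (List Int)} {f : Nat} {cur : Int} {E : List (List Int)}
    {V : PySem.Set Int} (hv : cur ∉ V) (hrow : PySem.List.pyGet? adj cur = none) :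
    pvDfsA adj (f + 1) cur E V = none := by
  simp [pvDfsA, hv, hrow]

theorem pvLoopA_nil (adj : List (List Int)) (f : Nat) (c : Int) (E : List (List Int))
    (V : PySem.Set Int) : pvLoopA adj f c [] E V = some (E, V) := by
  simp [pvLoopA]

theorem pvLoopA_cons_none {adj : List (List Int)} {f : Nat} {c a : Int} {rest : List Int}
    {E : List (List Int)} {V : PySem.Set Int}
    (h : pvDfsA adj f a (pvRecordEdge c a E) V = none) :
    pvLoopA adj f c (a :: rest) E V = none := by
  simp [pvLoopA, h]

theorem pvLoopA_cons_some {adj : List (List Int)} {f : Nat} {c a : Int} {rest : List Int}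
    {E E' : List (List Int)} {V V' : PySem.Set Int}
    (h : pvDfsA adj f a (pvRecordEdge c a E) V = some (E', V')) :
    pvLoopA adj f c (a :: rest) E V = pvLoopA adj f c rest E' V' := by
  simp [pvLoopA, h]

theorem pvDfsB_zero (adj : List (List Int)) (S : List (Int × Int)) (E : List (List Int))
    (V : PySem.Set Int) : pvDfsB adj 0 S E V = none := by
  simp [pvDfsB]

theorem pvDfsB_nil (adj : List (List Int)) (f : Nat) (E : List (List Int))
    (V : PySem.Set Int) : pvDfsB adj (f + 1) [] E V = some E := by
  simp [pvDfsB]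

theorem pvDfsB_err {adj : List (List Int)} {f : Nat} {node pos : Int} {S : List (Int × Int)}
    {E : List (List Int)} {V : PySem.Set Int} (h : PySem.List.pyGet? adj node = none) :
    pvDfsB adj (f + 1) ((node, pos) :: S) E V = none := by
  simp [pvDfsB, h]

theorem pvDfsB_pop {adj : List (List Int)} {f : Nat} {node pos : Int} {S : List (Int × Int)}
    {E : List (List Int)} {V : PySem.Set Int} {nbrs : List Int}
    (hrow : PySem.List.pyGet? adj node = some nbrs) (hpos : pos = (nbrs.length : Int)) :
    pvDfsB adj (f + 1) ((node, pos) :: S) E V = pvDfsB adj f S E V := by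
  simp [pvDfsB, hrow, hpos]

theorem pvDfsB_err2 {adj : List (List Int)} {f : Nat} {node pos : Int} {S : List (Int × Int)}
    {E : List (List Int)} {V : PySem.Set Int} {nbrs : List Int}
    (hrow : PySem.List.pyGet? adj node = some nbrs) (hpos : pos ≠ (nbrs.length : Int))
    (hget : PySem.List.pyGet? nbrs pos = none) :
    pvDfsB adj (f + 1) ((node, pos) :: S) E V = none := by
  simp [pvDfsB, hrow, hpos, hget]

theorem pvDfsB_adv_vis {adj : List (List Int)} {f : Nat} {node pos a : Int}
    {S : List (Int × Int)} {E : List (List Int)} {V : PySem.Set Int} {nbrs : List Int}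
    (hrow : PySem.List.pyGet? adj node = some nbrs) (hpos : pos ≠ (nbrs.length : Int))
    (hget : PySem.List.pyGet? nbrs pos = some a) (hv : a ∈ V) :
    pvDfsB adj (f + 1) ((node, pos) :: S) E V =
      pvDfsB adj f ((node, pos + 1) :: S) (pvRecordEdge node a E) V := by
  simp [pvDfsB, hrow, hpos, hget, hv]

theorem pvDfsB_adv_new {adj : List (List Int)} {f : Nat} {node pos a : Int}
    {S : List (Int × Int)} {E : List (List Int)} {V : PySem.Set Int} {nbrs : List Int}
    (hrow : PySem.List.pyGet? adj node = some nbrs) (hpos : pos ≠ (nbrs.length : Int))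
    (hget : PySem.List.pyGet? nbrs pos = some a) (hv : a ∉ V) :
    pvDfsB adj (f + 1) ((node, pos) :: S) E V =
      pvDfsB adj f ((a, 0) :: (node, pos + 1) :: S) (pvRecordEdge node a E)
        (PySem.Set.add V a) := by
  simp [pvDfsB, hrow, hpos, hget, hv]

theorem pv_keep {V : PySem.Set Int} {x : Int} (h : x ∉ V) :
    (!(PySem.Set.contains V x)) = true := by
  rw [pv_contains_eq_false h]; rfl

theorem pv_drop {V : PySem.Set Int} {x : Int} (h : x ∈ V) :
    ¬ ((!(PySem.Set.contains V x)) = true) := by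
  rw [pv_contains_eq_true h]; simp

theorem pv_filter_split {l : List Int} (hnd : l.Nodup) (V : PySem.Set Int) (a : Int)
    (ha : a ∈ l) (hav : a ∉ V) :
    ∃ l1 l2, l.filter (fun x => !(PySem.Set.contains V x)) = l1 ++ a :: l2 ∧
      l.filter (fun x => !(PySem.Set.contains (PySem.Set.add V a) x)) = l1 ++ l2 := by
  induction l with
  | nil => cases ha
  | cons x xs ih =>
    rcases List.nodup_cons.mp hnd with ⟨hxn, hnd'⟩
    by_cases hx : x = a
    · subst hx
      have hxs : xs.filter (fun y => !(PySem.Set.contains (PySem.Set.add V x) y)) =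
          xs.filter (fun y => !(PySem.Set.contains V y)) := by
        apply List.filter_congr
        intro y hy
        have hne : y ≠ x := fun he => hxn (he ▸ hy)
        rw [pv_contains_add_ne V x y hne]
      refine ⟨[], xs.filter (fun y => !(PySem.Set.contains V y)), ?_, ?_⟩
      · rw [List.filter_cons, if_pos (pv_keep hav)]
        rfl
      · rw [List.filter_cons, if_neg (pv_drop (pv_mem_add_self V x))]
        exact hxs
    · have ha' : a ∈ xs := by
        rcases List.mem_cons.mp ha with h1 | h1
        · exact absurd h1.symm hx
        · exact h1
      obtain ⟨l1, l2, e1, e2⟩ := ih hnd' ha'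
      have hcx : PySem.Set.contains (PySem.Set.add V a) x = PySem.Set.contains V x :=
        pv_contains_add_ne V a x hx
      by_cases hxv : x ∈ V
      · refine ⟨l1, l2, ?_, ?_⟩
        · rw [List.filter_cons, if_neg (pv_drop hxv)]
          exact e1
        · rw [List.filter_cons, if_neg (by rw [hcx]; exact pv_drop hxv)]
          exact e2
      · refine ⟨x :: l1, l2, ?_, ?_⟩
        · rw [List.filter_cons, if_pos (pv_keep hxv), e1]
          rfl
        · rw [List.filter_cons, if_pos (by rw [hcx]; exact pv_keep hxv), e2]
          rfl

theorem pvNodes_nodup (adj : List (List Int)) : (pvNodes adj).Nodup :=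
  PySem.List.nodup_dedup _

theorem pvMu_add (adj : List (List Int)) (V : PySem.Set Int) (a : Int)
    (ha : a ∈ pvNodes adj) (hav : a ∉ V) :
    pvMu adj (PySem.Set.add V a) + pvW adj a = pvMu adj V := by
  obtain ⟨l1, l2, e1, e2⟩ := pv_filter_split (pvNodes_nodup adj) V a ha hav
  rw [pvMu_eq, pvMu_eq, e1, e2, List.map_append, List.map_append, List.sum_append,
    List.sum_append, List.map_cons, List.sum_cons]
  omega

theorem pvUnvis_add (adj : List (List Int)) (V : PySem.Set Int) (a : Int)
    (ha : a ∈ pvNodes adj) (hav : a ∉ V) :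
    pvUnvis adj (PySem.Set.add V a) + 1 = pvUnvis adj V := by
  obtain ⟨l1, l2, e1, e2⟩ := pv_filter_split (pvNodes_nodup adj) V a ha hav
  unfold pvUnvis
  rw [e1, e2, List.length_append, List.length_append, List.length_cons]
  omega

theorem pvUnvis_mono (adj : List (List Int)) {V V' : PySem.Set Int}
    (h : ∀ x, x ∈ V → x ∈ V') : pvUnvis adj V' ≤ pvUnvis adj V := by
  unfold pvUnvis
  generalize pvNodes adj = l
  induction l with
  | nil => simp
  | cons x xs ih =>
    by_cases hx : x ∈ V
    · have hx' : x ∈ V' := h x hx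
      rw [List.filter_cons, List.filter_cons, if_neg (pv_drop hx'), if_neg (pv_drop hx)]
      exact ih
    · by_cases hx' : x ∈ V'
      · rw [List.filter_cons, List.filter_cons, if_neg (pv_drop hx'), if_pos (pv_keep hx),
          List.length_cons]
        omega
      · rw [List.filter_cons, List.filter_cons, if_pos (pv_keep hx'), if_pos (pv_keep hx),
          List.length_cons, List.length_cons]
        omega

theorem pv_mem_nodes_of_flatten {adj : List (List Int)} {a : Int}
    (h : a ∈ adj.flatten) : a ∈ pvNodes adj := by
  unfold pvNodes
  rw [PySem.List.mem_dedup]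
  exact List.mem_cons_of_mem _ h

-- totality of A's DFS under pvGood, with enough fuel; visited only grows
theorem pvDfsA_total (adj : List (List Int)) (hg : pvGood adj) :
    ∀ f cur E V, cur ∈ pvNodes adj → pvUnvis adj V + 1 ≤ f →
      ∃ out, pvDfsA adj f cur E V = some out ∧ (∀ x, x ∈ V → x ∈ out.2) := by
  intro f
  induction f using Nat.strong_induction_on with
  | _ f IHf =>
    intro cur E V hcur hfuel
    cases f with
    | zero => exact absurd hfuel (by omega)
    | succ g =>
      by_cases hv : cur ∈ V
      · exact ⟨(E, V), pvDfsA_succ_mem hv, fun x h => h⟩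
      · have hrange : 0 ≤ cur ∧ cur < (adj.length : Int) := by
          have hmem : cur = 0 ∨ cur ∈ adj.flatten := by
            unfold pvNodes at hcur
            rw [PySem.List.mem_dedup] at hcur
            simpa using hcur
          rcases hmem with h1 | h1
          · subst h1
            refine ⟨le_refl _, ?_⟩
            have hlen : 0 < adj.length := List.length_pos_iff.mpr hg.1
            exact_mod_cast hlen
          · exact hg.2 cur h1
        obtain ⟨row, hrow⟩ : ∃ row, PySem.List.pyGet? adj cur = some row := by
          have hcast : ((cur.toNat : Nat) : Int) = cur := Int.toNat_of_nonneg hrange.1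
          have hlt : cur.toNat < adj.length := by omega
          refine ⟨adj[cur.toNat], ?_⟩
          have hx : PySem.List.pyGet? adj ((cur.toNat : Nat) : Int) = adj[cur.toNat]? :=
            PySem.List.pyGet?_natCast adj cur.toNat
          rw [hcast] at hx
          rw [hx, List.getElem?_eq_getElem hlt]
        have hfg : pvUnvis adj (PySem.Set.add V cur) + 1 ≤ g := by
          have := pvUnvis_add adj V cur hcur hv
          omega
        have hrowsub : ∀ x ∈ row, x ∈ adj.flatten := by
          intro x hx
          exact List.mem_flatten.mpr ⟨row, PySem.List.mem_of_pyGet?_eq_some _ hrow, hx⟩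
        have inner : ∀ pend, (∀ x ∈ pend, x ∈ adj.flatten) →
            ∀ E' V', pvUnvis adj V' + 1 ≤ g →
              ∃ out, pvLoopA adj g cur pend E' V' = some out ∧
                (∀ x, x ∈ V' → x ∈ out.2) := by
          intro pend
          induction pend with
          | nil => exact fun _ E' V' _ => ⟨(E', V'), pvLoopA_nil adj g cur E' V', fun x h => h⟩
          | cons a t iht =>
            intro hsub E' V' hf'
            have ha : a ∈ pvNodes adj :=
              pv_mem_nodes_of_flatten (hsub a List.mem_cons_self)
            obtain ⟨out1, h1, hm1⟩ :=
              IHf g (Nat.lt_succ_self g) a (pvRecordEdge cur a E') V' ha hf'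
            have hf'' : pvUnvis adj out1.2 + 1 ≤ g := by
              have := pvUnvis_mono adj hm1
              omega
            obtain ⟨out, h2, hm2⟩ :=
              iht (fun x hx => hsub x (List.mem_cons_of_mem a hx)) out1.1 out1.2 hf''
            refine ⟨out, ?_, fun x hx => hm2 x (hm1 x hx)⟩
            obtain ⟨E1, V1⟩ := out1
            rw [pvLoopA_cons_some h1]
            exact h2
        obtain ⟨out, hloop, hmono⟩ := inner row hrowsub E (PySem.Set.add V cur) hfg
        refine ⟨out, ?_, fun x hx => hmono x (pv_mem_add_of_mem cur hx)⟩
        rw [pvDfsA_step hv hrow]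
        exact hloop

-- fuel monotonicity of B's machine
theorem pvDfsB_succ (adj : List (List Int)) :
    ∀ f S E V r, pvDfsB adj f S E V = some r → pvDfsB adj (f + 1) S E V = some r := by
  intro f
  induction f with
  | zero => intro S E V r h; rw [pvDfsB_zero] at h; cases h
  | succ g ih =>
    intro S E V r h
    match S with
    | [] => rw [pvDfsB_nil] at h ⊢; exact h
    | (node, pos) :: S' =>
      cases hn : PySem.List.pyGet? adj node with
      | none => rw [pvDfsB_err hn] at h; cases h
      | some nbrs =>
        by_cases hpos : pos = PySem.List.len nbrs
        · rw [pvDfsB_pop hn hpos] at h ⊢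
          exact ih _ _ _ _ h
        · cases hg : PySem.List.pyGet? nbrs pos with
          | none => rw [pvDfsB_err2 hn hpos hg] at h; cases h
          | some a =>
            by_cases hc : a ∈ V
            · rw [pvDfsB_adv_vis hn hpos hg hc] at h ⊢; exact ih _ _ _ _ h
            · rw [pvDfsB_adv_new hn hpos hg hc] at h ⊢; exact ih _ _ _ _ h

theorem pvDfsB_mono (adj : List (List Int)) {f f' : Nat} (hle : f ≤ f')
    {S : List (Int × Int)} {E : List (List Int)} {V : PySem.Set Int} {r : List (List Int)}
    (h : pvDfsB adj f S E V = some r) : pvDfsB adj f' S E V = some r := by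
  induction f', hle using Nat.le_induction with
  | base => exact h
  | succ n hn ih => exact pvDfsB_succ adj n S E V r ih

-- THE SIMULATION: one completed run of A's neighbour loop equals an exact number k of steps
-- of B's machine, advancing the top frame from position p to the end of the row
theorem pv_sim (adj : List (List Int)) :
    ∀ fA c row, PySem.List.pyGet? adj c = some row →
      ∀ pend E V out, pvLoopA adj fA c pend E V = some out →
        ∀ p : Nat, pend = row.drop p → p ≤ row.length → (∀ x ∈ pend, x ∈ adj.flatten) →
          ∃ k, k + pvMu adj out.2 ≤ pend.length + pvMu adj V ∧
            ∀ fB S, pvDfsB adj (k + fB) ((c, (p : Int)) :: S) E V =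
              pvDfsB adj fB ((c, (row.length : Int)) :: S) out.1 out.2 := by
  intro fA
  induction fA using Nat.strong_induction_on with
  | _ fA IHf =>
    intro c row hrow pend
    induction pend with
    | nil =>
      intro E V out hloop p hdrop hp _
      rw [pvLoopA_nil] at hloop
      have hout : (E, V) = out := Option.some.inj hloop
      subst hout
      have hpl : p = row.length := by
        have := List.drop_eq_nil_iff.mp hdrop.symm
        omega
      exact ⟨0, by simp, fun fB S => by rw [hpl]; simp⟩
    | cons a t iht =>
      intro E V out hloop p hdrop hp hsub
      -- position facts
      have hplen : p < row.length := by
        by_contra hge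
        have hnil : row.drop p = [] := List.drop_eq_nil_iff.mpr (by omega)
        rw [hnil] at hdrop; cases hdrop
      have hpa : row[p]? = some a := by
        have h0 : (row.drop p)[0]? = some a := by rw [← hdrop]; rfl
        rwa [List.getElem?_drop, Nat.add_zero] at h0
      have htdrop : t = row.drop (p + 1) := by
        have hdd : (row.drop p).drop 1 = row.drop (p + 1) := List.drop_drop
        rw [← hdrop] at hdd
        simpa using hdd
      have hga : PySem.List.pyGet? row ((p : Nat) : Int) = some a := by
        rw [PySem.List.pyGet?_natCast]; exact hpa
      have hpne : ((p : Nat) : Int) ≠ (row.length : Int) := by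
        exact_mod_cast Nat.ne_of_lt hplen
      have hcast1 : ((p : Nat) : Int) + 1 = (((p + 1 : Nat)) : Int) := by push_cast; ring
      have hanode : a ∈ pvNodes adj :=
        pv_mem_nodes_of_flatten (hsub a List.mem_cons_self)
      have htsub : ∀ x ∈ t, x ∈ adj.flatten :=
        fun x hx => hsub x (List.mem_cons_of_mem a hx)
      -- the inner recursive call of A
      cases hd : pvDfsA adj fA a (pvRecordEdge c a E) V with
      | none => rw [pvLoopA_cons_none hd] at hloop; cases hloop
      | some st =>
        obtain ⟨E1, V1⟩ := st
        have hloop2 : pvLoopA adj fA c t E1 V1 = some out := by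
          rw [pvLoopA_cons_some hd] at hloop; exact hloop
        cases fA with
        | zero => rw [pvDfsA_zero] at hd; cases hd
        | succ g =>
          by_cases hv : a ∈ V
          · -- already visited: A's call returns at once; B does one advance step
            rw [pvDfsA_succ_mem hv] at hd
            injection hd with hd'
            injection hd' with hE1 hV1
            subst hE1
            subst hV1
            obtain ⟨kt, hktb, hkte⟩ :=
              iht (pvRecordEdge c a E) V out hloop2 (p + 1) htdrop (by omega) htsub
            refine ⟨kt + 1, by simp only [List.length_cons]; omega, ?_⟩
            intro fB S
            have e1 : pvDfsB adj (kt + 1 + fB) ((c, (p : Int)) :: S) E V =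
                pvDfsB adj (kt + fB) ((c, ((p : Int)) + 1) :: S) (pvRecordEdge c a E) V := by
              rw [show kt + 1 + fB = (kt + fB) + 1 from by omega]
              exact pvDfsB_adv_vis hrow hpne hga hv
            rw [e1, hcast1]
            exact hkte fB S
          · -- a new node: B pushes a frame, runs it to completion, pops it
            obtain ⟨rowa, hra⟩ : ∃ r, PySem.List.pyGet? adj a = some r := by
              cases hra : PySem.List.pyGet? adj a with
              | none => rw [pvDfsA_step_none hv hra] at hd; cases hd
              | some r => exact ⟨r, rfl⟩
            rw [pvDfsA_step hv hra] at hd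
            have hrasub : ∀ x ∈ rowa, x ∈ adj.flatten := by
              intro x hx
              exact List.mem_flatten.mpr ⟨rowa, PySem.List.mem_of_pyGet?_eq_some _ hra, hx⟩
            obtain ⟨kin, hkinb, hkine⟩ :=
              IHf g (Nat.lt_succ_self g) a rowa hra rowa (pvRecordEdge c a E)
                (PySem.Set.add V a) (E1, V1) hd 0 (by simp) (Nat.zero_le _) hrasub
            obtain ⟨kt, hktb, hkte⟩ :=
              iht E1 V1 out hloop2 (p + 1) htdrop (by omega) htsub
            have hwa : pvW adj a = rowa.length + 1 := by
              unfold pvW; rw [hra]; rfl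
            have hmu := pvMu_add adj V a hanode hv
            rw [hwa] at hmu
            have hkinb' : kin + pvMu adj V1 ≤ rowa.length + pvMu adj (PySem.Set.add V a) :=
              hkinb
            refine ⟨kin + kt + 2, ?_, ?_⟩
            · simp only [List.length_cons]
              omega
            · intro fB S
              have e1 : pvDfsB adj (kin + kt + 2 + fB) ((c, (p : Int)) :: S) E V =
                  pvDfsB adj (kin + (kt + 1 + fB))
                    ((a, (0 : Int)) :: (c, ((p : Int)) + 1) :: S) (pvRecordEdge c a E)
                    (PySem.Set.add V a) := by
                rw [show kin + kt + 2 + fB = (kin + (kt + 1 + fB)) + 1 from by omega]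
                exact pvDfsB_adv_new hrow hpne hga hv
              have hkine0 := hkine (kt + 1 + fB) ((c, ((p : Int)) + 1) :: S)
              simp only [Nat.cast_zero] at hkine0
              have e3 : pvDfsB adj (kt + 1 + fB)
                  ((a, (rowa.length : Int)) :: (c, ((p : Int)) + 1) :: S) (E1, V1).1 (E1, V1).2 =
                  pvDfsB adj (kt + fB) ((c, ((p : Int)) + 1) :: S) E1 V1 := by
                rw [show kt + 1 + fB = (kt + fB) + 1 from by omega]
                exact pvDfsB_pop hra rfl
              rw [e1, hkine0, e3, hcast1]
              exact hkte fB S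

-- the two adjacency lists coincide, row by row
theorem pv_filter_filterMap (l : List Int) (q : Int → Prop) [DecidablePred q] :
    l.filter (fun x => decide (q x)) = l.filterMap (fun x => if q x then some x else none) := by
  induction l with
  | nil => rfl
  | cons x xs ih =>
    by_cases h : q x <;> simp [h, ih]

theorem pvRow_eq (row : List Int) :
    (PySem.List.pyRange 0 (PySem.List.len row) 1).foldl
      (fun tl j => if PySem.List.pyGetD row j 0 = 1 then tl ++ [j] else tl) [] =
    (PySem.List.enumerate row).filterMap (fun jv => if jv.2 = 1 then some jv.1 else none) := by
  rw [PySem.List.foldl_append_ite_eq_filter]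
  rw [PySem.List.enumerate_eq_map_pyRange (d := 0), List.filterMap_map]
  simp only [List.nil_append]
  rw [pv_filter_filterMap _ (fun j => PySem.List.pyGetD row j 0 = 1)]
  apply List.filterMap_congr
  intro j _
  by_cases h : PySem.List.pyGetD row j 0 = 1 <;> simp [h]

theorem pvAdj_eq (pmtx : List (List Int)) : pvAdjA pmtx = pvAdjB pmtx := by
  unfold pvAdjA pvAdjB
  rw [PySem.List.foldl_append_singleton_eq_map]
  simp only [List.nil_append]
  conv_rhs =>
    rw [← PySem.List.map_pyGetD_pyRange_zero (xs := pmtx) (d := ([] : List Int)), List.map_map]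
  apply List.map_congr_left
  intro i _
  exact pvRow_eq (PySem.List.pyGetD pmtx i [])

theorem pvGood_of_pre (pmtx : List (List Int)) (h : Pre_query_dfs pmtx) :
    pvGood (pvAdjB pmtx) := by
  obtain ⟨hne, hcol⟩ := h
  constructor
  · simp [pvAdjB, hne]
  · intro x hx
    rcases List.mem_flatten.mp hx with ⟨r, hr, hxr⟩
    rcases List.mem_map.mp hr with ⟨row, hrow, hreq⟩
    rw [← hreq] at hxr
    rcases List.mem_filterMap.mp hxr with ⟨jv, hjv, hjx⟩
    by_cases h1 : jv.2 = 1
    · rw [if_pos h1] at hjx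
      have hx1 : jv.1 = x := Option.some.inj hjx
      constructor
      · rw [PySem.List.mem_enumerate_iff] at hjv
        rcases hjv with ⟨k, hk, hjveq⟩
        rw [← hx1, hjveq]
        simp
      · have := hcol row hrow jv hjv h1
        rw [hx1] at this
        simpa [pvAdjB, List.length_map] using this
    · rw [if_neg h1] at hjx; cases hjx

-- ===== VERDICT (by name: the statement is the Claim_ definition above) =====
theorem query_dfs_spec : Claim_equal_query_dfs := by
  intro pmtx _ hpre
  unfold Spec_query_dfs
  have hadj : pvAdjA pmtx = pvAdjB pmtx := pvAdj_eq pmtx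
  set adj := pvAdjB pmtx with hadjdef
  have hg : pvGood adj := pvGood_of_pre pmtx hpre
  have h0node : (0 : Int) ∈ pvNodes adj := by
    unfold pvNodes
    rw [PySem.List.mem_dedup]
    exact List.mem_cons_self
  have hfla : pvUnvis adj PySem.Set.empty + 1 ≤ pvFuelA adj := by
    have hle : pvUnvis adj PySem.Set.empty ≤ (pvNodes adj).length :=
      List.length_filter_le _ _
    unfold pvFuelA
    unfold pvNodes at hle
    omega
  obtain ⟨out, hrun, _⟩ :=
    pvDfsA_total adj hg (pvFuelA adj) 0 [] PySem.Set.empty h0node hfla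
  obtain ⟨row0, hr0⟩ : ∃ r, PySem.List.pyGet? adj 0 = some r := by
    have h0 : 0 < adj.length := List.length_pos_iff.mpr hg.1
    rw [PySem.List.pyGet?_zero]
    exact ⟨adj[0], by simp [List.getElem?_eq_getElem h0]⟩
  have hv0 : (0 : Int) ∉ PySem.Set.empty := by simp [PySem.Set.empty]
  have hrun' : pvLoopA adj (pvFuelA adj - 1) 0 row0 []
      (PySem.Set.add PySem.Set.empty 0) = some out := by
    rw [show pvFuelA adj = (pvFuelA adj - 1) + 1 from by unfold pvFuelA; omega,
      pvDfsA_step hv0 hr0] at hrun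
    exact hrun
  have hr0sub : ∀ x ∈ row0, x ∈ adj.flatten := by
    intro x hx
    exact List.mem_flatten.mpr ⟨row0, PySem.List.mem_of_pyGet?_eq_some _ hr0, hx⟩
  obtain ⟨k, hkb, hke⟩ :=
    pv_sim adj (pvFuelA adj - 1) 0 row0 hr0 row0 [] (PySem.Set.add PySem.Set.empty 0) out
      hrun' 0 (by simp) (Nat.zero_le _) hr0sub
  have hBfin : pvDfsB adj (k + 2) [((0 : Int), (0 : Int))] []
      (PySem.Set.add PySem.Set.empty 0) = some out.1 := by
    have h2 : pvDfsB adj 2 [((0 : Int), (row0.length : Int))] out.1 out.2 = some out.1 := by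
      rw [show (2 : Nat) = 1 + 1 from rfl, pvDfsB_pop hr0 rfl, pvDfsB_nil]
    have hke0 := hke 2 []
    simp only [Nat.cast_zero] at hke0
    rw [h2] at hke0
    exact hke0
  have hkle : k + 2 ≤ pvFuelB adj := by
    unfold pvFuelB
    rw [hr0]
    simp only [Option.getD_some]
    omega
  have hBr := pvDfsB_mono adj hkle hBfin
  show query_dfs pmtx = query_dfs_alt pmtx
  unfold query_dfs query_dfs_alt
  simp only [hadj, ← hadjdef]
  rw [hrun, hBr]
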